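-- pv_equiv track=rewrite | github.com/entanglementinc/vortex | bin/CramerShoup-ThreeFish-master/ThreeFish.py | blocs_to_message
-- ===== SOURCE A (Python) =====
-- def blocs_to_message(blocs, bool):
--     message = ""
--     for bloc in blocs:
--         message += bloc
--
--     # on supprime les derniers 0 si le booléen vaut 1 (déchiffrement)
--     if bool == 1:
--         while message[-8:] == "00000000":
--             message = message[:-8]
--     return message
-- ===== SOURCE B (Python) =====
-- def blocs_to_message(blocs, bool):
--     message = "".join(blocs)
--     if bool == 1:
--         t = len(message) - len(message.rstrip("0"))
--         message = message[: len(message) - 8 * (t // 8)]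
--     return message
-- ===== Notes on version B (the rewrite author's own statement) =====
-- stated objective: simpler
-- what changed: Replaces the += concatenation loop and the repeated strip-8-zeros-and-retest while-loop by one "".join plus a single slice computed from the trailing-zero count (rstrip).
import Mathlib
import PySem

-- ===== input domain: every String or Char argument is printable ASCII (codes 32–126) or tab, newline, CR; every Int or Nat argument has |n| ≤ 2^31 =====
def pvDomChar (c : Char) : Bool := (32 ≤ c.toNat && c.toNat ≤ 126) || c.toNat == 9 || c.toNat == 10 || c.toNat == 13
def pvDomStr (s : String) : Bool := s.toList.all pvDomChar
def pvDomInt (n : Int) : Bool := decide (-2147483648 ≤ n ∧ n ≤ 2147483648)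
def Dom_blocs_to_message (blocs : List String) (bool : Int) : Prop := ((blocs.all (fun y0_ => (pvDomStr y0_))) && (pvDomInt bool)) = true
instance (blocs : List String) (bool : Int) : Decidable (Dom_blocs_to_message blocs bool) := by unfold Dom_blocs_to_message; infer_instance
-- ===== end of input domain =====

-- B replaces A's += concatenation loop and its repeated strip-8-zeros-and-retest loop by one
-- "".join plus a single slice computed from the trailing-zero count (objective: simpler).

-- ===== PORT A =====
-- while message[-8:] == "00000000": message = message[:-8]
def pvStripLoop (cs : List Char) : List Char :=
  if PySem.List.slice cs (some (-8)) none = "00000000".toList then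
    pvStripLoop (PySem.List.slice cs none (some (-8)))
  else cs
termination_by cs.length
decreasing_by
  rename_i h
  have hl := congrArg List.length h
  rw [PySem.List.slice_some_none,
      PySem.List.clampIdx_neg_ofNat cs.length 8 (by omega)] at hl
  simp at hl
  rw [PySem.List.slice_to_neg_ofNat cs 8 (by omega)]
  simp; omega

def blocs_to_message (blocs : List String) (bool : Int) : String :=
  let message := blocs.foldl (fun acc bloc => acc ++ bloc.toList) ([] : List Char)
  if bool == 1 then String.ofList (pvStripLoop message) else String.ofList message

-- ===== PORT B =====
def blocs_to_message_alt (blocs : List String) (bool : Int) : String :=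
  let message := PySem.Str.join "" blocs
  if bool == 1 then
    let cs := message.toList
    -- t = len(message) - len(message.rstrip("0")); rstrip("0") ported by hand as
    -- dropping the trailing '0' code points (exact: '0' is a single ASCII code point)
    let t : Int := (cs.length : Int) - ((cs.reverse.dropWhile (fun c => c == '0')).reverse.length : Int)
    PySem.Str.slice message none (some ((cs.length : Int) - 8 * PySem.Int.floordiv t 8))
  else message

-- ===== PRECONDITION & SPEC =====
def Spec_blocs_to_message (blocs : List String) (bool : Int) (out : String) : Prop := out = blocs_to_message_alt blocs bool
instance (blocs : List String) (bool : Int) (out : String) : Decidable (Spec_blocs_to_message blocs bool out) := by unfold Spec_blocs_to_message; infer_instance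

-- ===== CLAIM (what is proved, stated in full; the proofs are below) =====
def Claim_equal_blocs_to_message : Prop := ∀ (blocs : List String) (bool : Int), Dom_blocs_to_message blocs bool → Spec_blocs_to_message blocs bool (blocs_to_message blocs bool)

-- ===== LEMMAS AND PROOFS =====
-- trailing-zero count of cs
def pvTZ (cs : List Char) : Nat := (cs.reverse.takeWhile (fun c => c == '0')).length

theorem pvTZ_le (cs : List Char) : pvTZ cs ≤ cs.length := by
  have := (List.takeWhile_sublist (fun c : Char => c == '0') (l := cs.reverse)).length_le
  simpa [pvTZ] using this

-- a prefix of n zeros is exactly a takeWhile-'0' length of at least n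
theorem pvTake_replicate_iff (n : Nat) (rs : List Char) :
    rs.take n = List.replicate n '0' ↔ n ≤ (rs.takeWhile (fun c => c == '0')).length := by
  induction n generalizing rs with
  | zero => simp
  | succ n ih =>
    cases rs with
    | nil => simp [List.replicate_succ]
    | cons c rs =>
      by_cases hc : c = '0'
      · simp [List.replicate_succ, hc, ih]
      · simp [List.replicate_succ, hc]

-- dropping a zero prefix shifts the takeWhile length
theorem pvTakeWhile_drop (n : Nat) (rs : List Char)
    (h : rs.take n = List.replicate n '0') :
    ((rs.drop n).takeWhile (fun c => c == '0')).length
      = (rs.takeWhile (fun c => c == '0')).length - n := by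
  induction n generalizing rs with
  | zero => simp
  | succ n ih =>
    cases rs with
    | nil => simp at h
    | cons c rs =>
      rw [List.take_succ_cons, List.replicate_succ] at h
      have hc : c = '0' := by exact (List.cons_eq_cons.mp h).1
      have ht : rs.take n = List.replicate n '0' := (List.cons_eq_cons.mp h).2
      simp [hc, ih rs ht]

-- the loop condition holds iff there are at least 8 trailing zeros
theorem pvCond_iff (cs : List Char) :
    PySem.List.slice cs (some (-8)) none = "00000000".toList ↔ 8 ≤ pvTZ cs := by
  rw [PySem.List.slice_some_none,
      PySem.List.clampIdx_neg_ofNat cs.length 8 (by omega)]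
  have hz : "00000000".toList = (List.replicate 8 '0').reverse := by decide
  have key : List.drop (cs.length - 8) cs = (cs.reverse.take 8).reverse := by
    rw [List.take_reverse, List.reverse_reverse]
  rw [hz, key, List.reverse_inj]
  exact pvTake_replicate_iff 8 cs.reverse

-- main characterisation of A's loop
theorem pvStripLoop_eq (cs : List Char) :
    pvStripLoop cs = cs.take (cs.length - 8 * (pvTZ cs / 8)) := by
  induction cs using pvStripLoop.induct with
  | case1 cs h ih =>
    have htz : 8 ≤ pvTZ cs := (pvCond_iff cs).mp h
    have hlen : 8 ≤ cs.length := le_trans htz (pvTZ_le cs)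
    have hsl : PySem.List.slice cs none (some (-8)) = cs.take (cs.length - 8) :=
      PySem.List.slice_to_neg_ofNat cs 8 (by omega)
    rw [hsl] at ih
    rw [pvStripLoop, if_pos h, hsl]
    -- trailing-zero count of the shortened list
    have hrev : (cs.take (cs.length - 8)).reverse = cs.reverse.drop 8 := by
      rw [List.reverse_take]; congr 1; omega
    have hpre : cs.reverse.take 8 = List.replicate 8 '0' :=
      (pvTake_replicate_iff 8 cs.reverse).mpr htz
    have htz' : pvTZ (cs.take (cs.length - 8)) = pvTZ cs - 8 := by
      unfold pvTZ
      rw [hrev, pvTakeWhile_drop 8 cs.reverse hpre]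
    rw [ih, htz', List.take_take]
    have hdiv : pvTZ cs / 8 = (pvTZ cs - 8) / 8 + 1 := by
      conv_lhs => rw [show pvTZ cs = (pvTZ cs - 8) + 8 from by omega]
      rw [Nat.add_div_right _ (by omega)]
    congr 1
    simp [List.length_take]
    omega
  | case2 cs h =>
    have htz : pvTZ cs < 8 := by
      by_contra hge
      exact h ((pvCond_iff cs).mpr (by omega))
    rw [pvStripLoop, if_neg h, Nat.div_eq_of_lt htz]
    simp

-- the joined message, list-side
theorem pvJoin_toList (blocs : List String) :
    (PySem.Str.join "" blocs).toList
      = blocs.foldl (fun acc bloc => acc ++ bloc.toList) ([] : List Char) := by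
  have hj : ∀ ls : List (List Char), [].intercalate ls = ls.flatten := by
    intro ls
    rw [List.intercalate]
    induction ls with
    | nil => simp
    | cons x xs ih =>
      cases xs with
      | nil => simp
      | cons y ys => simp_all [List.intersperse]
  rw [PySem.Str.toList_join]
  show [].intercalate (blocs.map String.toList) = _
  rw [hj, PySem.List.foldl_append_eq_flatMap]
  simp [List.flatMap_def]

-- ===== VERDICT (by name: the statement is the Claim_ definition above) =====
theorem blocs_to_message_spec : Claim_equal_blocs_to_message := by
  intro blocs bool _
  unfold Spec_blocs_to_message blocs_to_message blocs_to_message_alt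
  simp only []
  by_cases hb : bool == 1
  · rw [if_pos hb, if_pos hb]
    set msg := blocs.foldl (fun acc bloc => acc ++ bloc.toList) ([] : List Char) with hmsg
    have hjoin : (PySem.Str.join "" blocs).toList = msg := pvJoin_toList blocs
    -- B's t equals the trailing-zero count
    have hdw : ((msg.reverse.dropWhile (fun c => c == '0')).reverse.length : Int)
        = (msg.length : Int) - (pvTZ msg : Int) := by
      have hsplit : (msg.reverse.takeWhile (fun c => c == '0')).length
          + (msg.reverse.dropWhile (fun c => c == '0')).length = msg.length := by
        conv_rhs => rw [← List.length_reverse (as := msg),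
          ← List.takeWhile_append_dropWhile (p := fun c : Char => c == '0') (l := msg.reverse)]
        rw [List.length_append]
      have h1 := pvTZ_le msg
      unfold pvTZ at *
      simp only [List.length_reverse]
      omega
    apply String.toList_injective
    rw [PySem.Str.toList_slice, String.toList_ofList, hjoin, hdw]
    have ht : (msg.length : Int) - ((msg.length : Int) - (pvTZ msg : Int)) = (pvTZ msg : Int) := by
      ring
    rw [ht]
    have hfd : PySem.Int.floordiv ((pvTZ msg : Nat) : Int) 8 = ((pvTZ msg / 8 : Nat) : Int) := by
      exact_mod_cast PySem.Int.floordiv_natCast (pvTZ msg) 8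
    rw [hfd]
    have hk : (msg.length : Int) - 8 * ((pvTZ msg / 8 : Nat) : Int)
        = ((msg.length - 8 * (pvTZ msg / 8) : Nat) : Int) := by
      have h1 : 8 * (pvTZ msg / 8) ≤ pvTZ msg := Nat.mul_div_le _ _
      have h2 := pvTZ_le msg
      push_cast
      omega
    rw [hk, PySem.Chars.slice_eq_listSlice, PySem.List.slice_to_natCast, pvStripLoop_eq]
  · rw [if_neg hb, if_neg hb]
    apply String.toList_injective
    rw [String.toList_ofList, pvJoin_toList blocs]
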